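-- pv_equiv track=rewrite | github.com/wojlin/SAT_SYSTEM | utils.py | extend_table
-- ===== SOURCE A (Python) =====
-- def extend_table(width, lines):
--     left_width = width
--     current_line = 0
--     max_line = len(lines)
--     while left_width > 0:
--         lines[current_line] += ' '
--         current_line += 1
--         if current_line == max_line:
--             current_line = 0
--         left_width -= 1
--
--     return ''.join(lines)
-- ===== SOURCE B (Python) =====
-- def extend_table(width, lines):
--     n = len(lines)
--     if width <= 0 or n == 0:
--         return ''.join(lines)
--     q, r = divmod(width, n)
--     pad, pad1 = ' ' * q, ' ' * (q + 1)
--     return ''.join([line + pad1 for line in lines[:r]] +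
--                    [line + pad for line in lines[r:]])
-- ===== Notes on version B (the rewrite author's own statement) =====
-- stated objective: alternative
-- what changed: Replaces the width-iteration round-robin while loop that mutates the list one space at a time by a closed-form divmod(width, len(lines)): the first r lines get q+1 spaces and the rest q, appended in one pass over the lines and joined (return value only: A mutates `lines` in place, B does not).
import Mathlib
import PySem

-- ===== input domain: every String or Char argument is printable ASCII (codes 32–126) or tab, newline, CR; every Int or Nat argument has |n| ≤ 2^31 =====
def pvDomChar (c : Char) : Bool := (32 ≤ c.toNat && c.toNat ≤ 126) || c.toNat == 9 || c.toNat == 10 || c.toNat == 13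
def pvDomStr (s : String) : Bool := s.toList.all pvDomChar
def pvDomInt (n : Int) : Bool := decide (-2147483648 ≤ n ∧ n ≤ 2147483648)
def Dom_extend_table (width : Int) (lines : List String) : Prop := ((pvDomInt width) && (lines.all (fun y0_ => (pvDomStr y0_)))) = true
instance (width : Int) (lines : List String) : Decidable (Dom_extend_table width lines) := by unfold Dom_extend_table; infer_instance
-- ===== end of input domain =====

-- B distributes the width spaces by one divmod and a single append pass instead of A's
-- width-step round-robin loop; equivalence is about the RETURN value only (Python A
-- mutates `lines` in place, B does not).

-- ===== PORT A =====
-- the while loop: fuel = left_width (decremented by 1 each iteration); cur = current_line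
def extendTableLoop (fuel : Nat) (cur : Int) (maxLine : Int) (ls : List String) : List String :=
  match fuel with
  | 0 => ls
  | n + 1 =>
    let s := PySem.List.pyGetD ls cur ""            -- lines[current_line] (in range under Pre_)
    let ls' := PySem.List.pySetD ls cur (s ++ " ")  -- lines[current_line] += ' '
    let cur' := cur + 1
    let cur'' := if cur' = maxLine then 0 else cur'
    extendTableLoop n cur'' maxLine ls'

def extend_table (width : Int) (lines : List String) : String :=
  let maxLine : Int := lines.length
  PySem.Str.join "" (extendTableLoop width.toNat 0 maxLine lines)

-- ===== PORT B =====
def extend_table_alt (width : Int) (lines : List String) : String :=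
  let n : Int := lines.length
  if width ≤ 0 ∨ n = 0 then PySem.Str.join "" lines
  else
    let q := PySem.Int.floordiv width n
    let r := PySem.Int.mod width n
    let pad := String.ofList (List.replicate q.toNat ' ')
    let pad1 := String.ofList (List.replicate (q + 1).toNat ' ')
    PySem.Str.join "" ((PySem.List.slice lines none (some r)).map (· ++ pad1) ++
      (PySem.List.slice lines (some r) none).map (· ++ pad))

-- ===== PRECONDITION & SPEC =====
-- Pre_ excludes exactly the inputs where A raises IndexError: a positive width with no lines.
def Pre_extend_table (width : Int) (lines : List String) : Prop := width ≤ 0 ∨ lines ≠ []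
instance (width : Int) (lines : List String) : Decidable (Pre_extend_table width lines) := by unfold Pre_extend_table; infer_instance
def pvWitness_extend_table : Int × List String := (5, ["ab", "c"])

def Spec_extend_table (width : Int) (lines : List String) (out : String) : Prop := out = extend_table_alt width lines
instance (width : Int) (lines : List String) (out : String) : Decidable (Spec_extend_table width lines out) := by unfold Spec_extend_table; infer_instance

-- ===== CLAIM (what is proved, stated in full; the proofs are below) =====
def Claim_equal_extend_table : Prop := ∀ (width : Int) (lines : List String), Dom_extend_table width lines → Pre_extend_table width lines → Spec_extend_table width lines (extend_table width lines)

-- ===== LEMMAS AND PROOFS =====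

-- spaces helper (proof-side only)
def pvSp (k : Nat) : String := String.ofList (List.replicate k ' ')

theorem pvSp_append_one (s : String) (q : Nat) : (s ++ pvSp q) ++ " " = s ++ pvSp (q + 1) := by
  apply String.toList_injective
  simp [pvSp, List.replicate_succ']

theorem pvSp_one_append (s : String) (q : Nat) : (s ++ " ") ++ pvSp q = s ++ pvSp (q + 1) := by
  apply String.toList_injective
  simp [pvSp, List.replicate_succ]

theorem pvSp_zero (s : String) : s ++ pvSp 0 = s := by
  apply String.toList_injective
  simp [pvSp]

theorem loop_step (n : Nat) (c : Nat) (maxLine : Int) (ls : List String) (hc : c < ls.length) :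
    extendTableLoop (n + 1) (c : Int) maxLine ls =
      extendTableLoop n (if (c : Int) + 1 = maxLine then 0 else (c : Int) + 1) maxLine
        (ls.set c (ls[c] ++ " ")) := by
  simp [extendTableLoop, List.getD, hc]

theorem loop_seg (m : Nat) : ∀ (c : Nat) (ls : List String),
    c + m ≤ ls.length →
    extendTableLoop m (c : Int) (ls.length : Int) ls =
      ls.take c ++ ((ls.drop c).take m).map (· ++ " ") ++ ls.drop (c + m) := by
  induction m with
  | zero => intro c ls _; simp [extendTableLoop]
  | succ m ih =>
    intro c ls hle
    have hc : c < ls.length := by omega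
    have hset : ls.set c (ls[c] ++ " ") = ls.take c ++ (ls[c] ++ " ") :: ls.drop (c+1) := by
      rw [List.set_eq_take_append_cons_drop]; simp [hc]
    have hdropc : ls.drop c = ls[c] :: ls.drop (c+1) := List.drop_eq_getElem_cons hc
    rw [loop_step m c _ ls hc]
    by_cases hend : (c : Int) + 1 = (ls.length : Int)
    · have hm : m = 0 := by omega
      subst hm
      simp only [extendTableLoop, hend, if_pos]
      rw [hset, hdropc]
      simp only [List.take_succ_cons, List.take_zero, List.map_cons, List.map_nil]
      simp
    · have hif : (if (c : Int) + 1 = (ls.length : Int) then 0 else (c : Int) + 1) = ((c + 1 : Nat) : Int) := by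
        simp [hend]
      rw [hif]
      have hih := ih (c+1) (ls.set c (ls[c] ++ " ")) (by simp; omega)
      simp only [List.length_set] at hih
      rw [hih]
      rw [hset, hdropc]
      rw [List.take_append, List.drop_append]
      have hlt : (ls.take c).length = c := by simp; omega
      rw [hlt]
      simp only [Nat.add_sub_cancel_left, Nat.succ_sub_one]
      rw [List.take_of_length_le (by omega : (ls.take c).length ≤ c+1)]
      have hlenM : c < (List.map (fun x => x ++ " ") ls).length := by simp [hc]
      have h1 : List.drop (c+1) (List.take c (List.map (fun x => x ++ " ") ls)) = [] := by
        apply List.drop_eq_nil_of_le; simp; try omega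
      have h2 : List.drop (c+1+m) (List.take c ls) = [] := by
        apply List.drop_eq_nil_of_le; simp; try omega
      have h3 : List.drop c (List.map (fun x => x ++ " ") ls)
          = (ls[c] ++ " ") :: List.drop (c+1) (List.map (fun x => x ++ " ") ls) := by
        rw [List.drop_eq_getElem_cons hlenM]; simp
      simp [List.drop_append, hlt, List.drop_drop, h1, h2, h3]
      have h4 : c + 1 + m - c = m + 1 := by omega
      rw [h4, List.drop_succ_cons, List.drop_drop]
      congr 1
      omega

theorem loop_wrap (m : Nat) : ∀ (c : Nat) (ls : List String) (k : Nat),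
    c + m + 1 = ls.length →
    extendTableLoop (m + 1 + k) (c : Int) (ls.length : Int) ls =
      extendTableLoop k 0 (ls.length : Int) (ls.take c ++ (ls.drop c).map (· ++ " ")) := by
  induction m with
  | zero =>
    intro c ls k hlen
    have hc : c < ls.length := by omega
    have hstep := loop_step k c (ls.length : Int) ls hc
    rw [show 0 + 1 + k = k + 1 by omega, hstep]
    have hend : (c : Int) + 1 = (ls.length : Int) := by omega
    rw [if_pos hend]
    congr 1
    rw [List.set_eq_take_append_cons_drop]
    simp only [hc, if_pos]
    rw [List.drop_eq_getElem_cons hc]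
    have hnil : ls.drop (c+1) = [] := by apply List.drop_eq_nil_of_le; omega
    simp [hnil]
  | succ m ih =>
    intro c ls k hlen
    have hc : c < ls.length := by omega
    have hstep := loop_step (m + 1 + k) c (ls.length : Int) ls hc
    rw [show m + 1 + 1 + k = (m + 1 + k) + 1 by omega, hstep]
    have hend : ¬ ((c : Int) + 1 = (ls.length : Int)) := by omega
    rw [if_neg hend]
    have hih := ih (c + 1) (ls.set c (ls[c] ++ " ")) k (by simp; omega)
    simp only [List.length_set] at hih
    rw [show (c : Int) + 1 = ((c + 1 : Nat) : Int) by omega, hih]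
    congr 1
    have hset : ls.set c (ls[c] ++ " ") = ls.take c ++ (ls[c] ++ " ") :: ls.drop (c+1) := by
      rw [List.set_eq_take_append_cons_drop]; simp [hc]
    have hlt : (ls.take c).length = c := by simp; omega
    rw [hset, List.take_append, List.drop_append, hlt]
    rw [List.take_of_length_le (by omega : (ls.take c).length ≤ c+1)]
    have h1 : List.drop (c+1) (ls.take c) = [] := by apply List.drop_eq_nil_of_le; simp
    have h3 : List.drop c (List.map (fun x => x ++ " ") ls)
        = (ls[c] ++ " ") :: List.drop (c+1) (List.map (fun x => x ++ " ") ls) := by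
      rw [List.drop_eq_getElem_cons (by simp [hc])]; simp
    simp [h1, h3]

theorem loop_rounds (q : Nat) : ∀ (r : Nat) (ls : List String),
    ls ≠ [] →
    extendTableLoop (q * ls.length + r) 0 (ls.length : Int) ls =
      extendTableLoop r 0 (ls.length : Int) (ls.map (· ++ pvSp q)) := by
  induction q with
  | zero =>
    intro r ls _
    have hmap : ls.map (· ++ pvSp 0) = ls := by
      simp [pvSp_zero]
    rw [hmap]
    norm_num
  | succ q ih =>
    intro r ls hne
    have hpos : 0 < ls.length := List.length_pos_iff.mpr hne
    have hwrap := loop_wrap (ls.length - 1) 0 ls (q * ls.length + r) (by omega)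
    rw [show (q + 1) * ls.length + r = (ls.length - 1) + 1 + (q * ls.length + r) by
      rw [Nat.sub_add_cancel hpos, Nat.succ_mul]; ring]
    rw [show ((0 : Nat) : Int) = (0 : Int) by norm_num] at hwrap
    rw [hwrap]
    simp only [List.take_zero, List.drop_zero, List.nil_append]
    have hih := ih r (ls.map (· ++ " ")) (by simp [hne])
    simp only [List.length_map] at hih
    rw [hih, List.map_map]
    congr 1
    apply List.map_congr_left
    intro s _
    exact pvSp_one_append s q

theorem extend_table_spec : Claim_equal_extend_table := by
  intro width lines _ hpre
  unfold Spec_extend_table extend_table extend_table_alt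
  simp only []
  by_cases hw : width ≤ 0
  · rw [if_pos (Or.inl hw)]
    rw [show width.toNat = 0 by omega]
    rfl
  · push_neg at hw
    have hne : lines ≠ [] := by
      rcases hpre with h | h
      · omega
      · exact h
    have hN : 0 < lines.length := List.length_pos_iff.mpr hne
    have hn0 : ¬ (width ≤ 0 ∨ (lines.length : Int) = 0) := by
      push_neg
      constructor
      · omega
      · omega
    rw [if_neg hn0]
    set q := PySem.Int.floordiv width (lines.length : Int) with hqdef
    set r := PySem.Int.mod width (lines.length : Int) with hrdef
    have hq : q = width / (lines.length : Int) :=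
      PySem.Int.floordiv_eq_ediv_of_pos (by exact_mod_cast hN)
    have hr : r = width % (lines.length : Int) :=
      PySem.Int.mod_eq_emod_of_pos (by exact_mod_cast hN)
    have hq0 : 0 ≤ q := by
      rw [hq]; exact Int.ediv_nonneg (by omega) (by exact_mod_cast Nat.zero_le _)
    have hr0 : 0 ≤ r := by rw [hr]; exact Int.emod_nonneg _ (by omega)
    have hrlt : r < (lines.length : Int) := by
      rw [hr]; exact Int.emod_lt_of_pos _ (by exact_mod_cast hN)
    have hqr : q * (lines.length : Int) + r = width := by
      rw [hq, hr]; exact Int.ediv_add_emod' width _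
    have hwnat : width.toNat = q.toNat * lines.length + r.toNat := by
      have h1 : ((q.toNat * lines.length + r.toNat : Nat) : Int) = width := by
        push_cast [Int.toNat_of_nonneg hq0, Int.toNat_of_nonneg hr0]
        exact hqr
      omega
    have hrn : r.toNat < lines.length := by omega
    -- A side: q.toNat full rounds then r.toNat extra steps
    rw [hwnat, loop_rounds q.toNat r.toNat lines hne]
    have hseg := loop_seg r.toNat 0 (lines.map (· ++ pvSp q.toNat)) (by simp; omega)
    simp only [List.length_map] at hseg
    rw [show ((0 : Nat) : Int) = (0 : Int) by norm_num] at hseg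
    simp only [List.take_zero, List.drop_zero, List.nil_append, Nat.zero_add] at hseg
    rw [hseg]
    rw [PySem.List.slice_to lines hr0, PySem.List.slice_from lines hr0]
    have hq1 : (q + 1).toNat = q.toNat + 1 := by omega
    congr 1
    congr 1
    · rw [← List.map_take, List.map_map]
      apply List.map_congr_left
      intro s _
      simp only [Function.comp_apply]
      rw [pvSp_append_one s q.toNat]
      simp [pvSp, hq1]
    · rw [← List.map_drop]
      apply List.map_congr_left
      intro s _
      simp [pvSp]
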